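-- pv_equiv track=rewrite | github.com/elhamparhizgar2002/assignment-3 | ex7ass3.py | gen_unrooted_trees
-- ===== SOURCE A (Python) =====
-- def gen_unrooted_trees(current_tree, new_taxa):
--     new_trees = []
--     for i in range(1, len(current_tree) - 2):
--         j = -1
--         if current_tree[i] not in '(),;':
--             j = i
--         if current_tree[i] == '(':
--             m = 1
--             for j in range(i + 1, len(current_tree)):
--                 if current_tree[j] == '(':
--                     m += 1
--                 elif current_tree[j] == ')':
--                     m -= 1
--                 if m == 0:
--                     break
--         if j != -1:
--             new_tree = current_tree[:i] + ['('] + current_tree[i:j + 1] + [','] + [new_taxa] + [')'] + current_tree[j + 1:]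
--             new_trees.append(new_tree)
--     return new_trees
-- ===== SOURCE B (Python) =====
-- def gen_unrooted_trees(current_tree, new_taxa):
--     # One left-to-right stack pass precomputes, for every '(' token, the index of
--     # its matching ')' (an unmatched '(' maps to the last index, as A's scan does);
--     # the edge loop then looks the closing index up instead of rescanning.
--     n = len(current_tree)
--     match = [n - 1] * n
--     stack = []
--     for k, tok in enumerate(current_tree):
--         if tok == '(':
--             stack.append(k)
--         elif tok == ')' and stack:
--             match[stack.pop()] = k
--     new_trees = []
--     for i in range(1, n - 2):
--         tok = current_tree[i]
--         if tok == '(':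
--             j = match[i]
--         elif tok not in '(),;':
--             j = i
--         else:
--             continue
--         new_trees.append(current_tree[:i] + ['('] + current_tree[i:j + 1]
--                         + [',', new_taxa, ')'] + current_tree[j + 1:])
--     return new_trees
-- ===== Notes on version B (the rewrite author's own statement) =====
-- stated objective: alternative
-- what changed: Replaces A's per-edge inner bracket rescan by a single left-to-right stack pass that precomputes a match table from each '(' to its closing ')', so each edge insertion looks its closing index up in O(1).
import Mathlib
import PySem

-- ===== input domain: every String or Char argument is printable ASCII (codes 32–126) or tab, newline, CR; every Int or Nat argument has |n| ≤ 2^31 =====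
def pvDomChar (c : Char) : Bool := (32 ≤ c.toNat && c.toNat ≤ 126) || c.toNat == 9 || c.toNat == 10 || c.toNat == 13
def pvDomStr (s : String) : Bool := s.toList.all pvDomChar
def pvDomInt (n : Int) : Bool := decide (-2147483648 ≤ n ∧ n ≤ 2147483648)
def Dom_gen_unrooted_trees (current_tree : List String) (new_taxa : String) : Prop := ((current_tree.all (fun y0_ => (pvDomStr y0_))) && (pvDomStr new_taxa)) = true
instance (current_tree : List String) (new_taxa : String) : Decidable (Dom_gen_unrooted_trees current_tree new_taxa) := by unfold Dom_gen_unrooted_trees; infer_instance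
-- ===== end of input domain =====

-- B replaces A's per-edge inner bracket rescan by one stack pass that precomputes a
-- '(' → matching-')' index table; each edge insertion then looks its closing index up.

-- ===== PORT A =====
-- A's inner loop 'for j in range(i+1, len(current_tree)): … if m == 0: break',
-- entered with j = i+1 and m = 1; returns the loop variable j at break, or the
-- last index len-1 when the loop runs out (the loop is always entered here).
def scanA (ct : List String) (j : Nat) (m : Int) : Nat :=
  if h : j < ct.length then
    let m' := if ct.getD j "" = "(" then m + 1
              else if ct.getD j "" = ")" then m - 1 else m
    if m' = 0 then j
    else if j + 1 < ct.length then scanA ct (j + 1) m'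
    else j
  else j
termination_by ct.length - j

def gen_unrooted_trees (current_tree : List String) (new_taxa : String) : List (List String) :=
  (PySem.List.pyRange 1 ((current_tree.length : Int) - 2) 1).foldl (fun new_trees i =>
    -- i is in range(1, len-2), so current_tree[i] is in range
    let tok := PySem.List.pyGetD current_tree i ""
    let j0 : Int := if PySem.Str.isIn tok "(),;" then -1 else i
    let j : Int := if tok = "(" then ((scanA current_tree (i.toNat + 1) 1 : Nat) : Int) else j0
    if j ≠ -1 then
      new_trees ++ [PySem.List.slice current_tree none (some i) ++ ["("] ++
        PySem.List.slice current_tree (some i) (some (j + 1)) ++ [","] ++ [new_taxa] ++ [")"] ++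
        PySem.List.slice current_tree (some (j + 1)) none]
    else new_trees) []

-- ===== PORT B =====
-- one step of Source B's stack pass ('append'/'pop' on the end of a Python list = cons/head here);
-- indices produced by enumerate are ≥ 0, so .toNat is exact
def bStep (s : List Nat × List Nat) (kt : Int × String) : List Nat × List Nat :=
  if kt.2 = "(" then (s.1, kt.1.toNat :: s.2)
  else if kt.2 = ")" then
    match s.2 with
    | [] => s
    | top :: rest => (s.1.set top kt.1.toNat, rest)
  else s

-- match = [n-1]*n; for k, tok in enumerate(current_tree): …
def buildMatch (ct : List String) : List Nat :=
  ((PySem.List.enumerate ct 0).foldl bStep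
    (List.replicate ct.length (ct.length - 1), [])).1

def gen_unrooted_trees_alt (current_tree : List String) (new_taxa : String) : List (List String) :=
  let mtch := buildMatch current_tree
  (PySem.List.pyRange 1 ((current_tree.length : Int) - 2) 1).foldl (fun new_trees i =>
    let tok := PySem.List.pyGetD current_tree i ""
    if tok = "(" then
      let j : Int := ((mtch.getD i.toNat 0 : Nat) : Int)
      new_trees ++ [PySem.List.slice current_tree none (some i) ++ ["("] ++
        PySem.List.slice current_tree (some i) (some (j + 1)) ++ [",", new_taxa, ")"] ++
        PySem.List.slice current_tree (some (j + 1)) none]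
    else if PySem.Str.isIn tok "(),;" then new_trees
    else
      new_trees ++ [PySem.List.slice current_tree none (some i) ++ ["("] ++
        PySem.List.slice current_tree (some i) (some (i + 1)) ++ [",", new_taxa, ")"] ++
        PySem.List.slice current_tree (some (i + 1)) none]) []

-- ===== PRECONDITION & SPEC =====
def Spec_gen_unrooted_trees (current_tree : List String) (new_taxa : String) (out : List (List String)) : Prop := out = gen_unrooted_trees_alt current_tree new_taxa
instance (current_tree : List String) (new_taxa : String) (out : List (List String)) : Decidable (Spec_gen_unrooted_trees current_tree new_taxa out) := by unfold Spec_gen_unrooted_trees; infer_instance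

-- ===== CLAIM (what is proved, stated in full; the proofs are below) =====
def Claim_equal_gen_unrooted_trees : Prop := ∀ (current_tree : List String) (new_taxa : String), Dom_gen_unrooted_trees current_tree new_taxa → Spec_gen_unrooted_trees current_tree new_taxa (gen_unrooted_trees current_tree new_taxa)

-- ===== LEMMAS AND PROOFS =====

-- the value A's scan will produce, seen from an intermediate position p with running count r
def scanCont (ct : List String) (p r : Nat) : Nat :=
  if p < ct.length then scanA ct p r else ct.length - 1

-- invariant of Source B's stack pass after processing the first p tokens
def pvInv (ct : List String) (p : Nat) (s : List Nat × List Nat) : Prop :=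
  s.1.length = ct.length ∧
  (∀ a ∈ s.2, a < p ∧ ct.getD a "" = "(" ∧ s.1.getD a 0 = ct.length - 1) ∧
  s.2.Pairwise (· > ·) ∧
  (∀ r (hr : r < s.2.length), s.2[r] = ct.length - 1 ∨
      scanA ct (s.2[r] + 1) 1 = scanCont ct p (r + 1)) ∧
  (∀ i, i < p → ct.getD i "" = "(" → i ∉ s.2 → s.1.getD i 0 = scanA ct (i + 1) 1) ∧
  (∀ i, p ≤ i → i < ct.length → s.1.getD i 0 = ct.length - 1)

theorem scanA_unfold (ct : List String) (p : Nat) (m : Int) (hp : p < ct.length) :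
    scanA ct p m =
      (if (if ct.getD p "" = "(" then m + 1 else if ct.getD p "" = ")" then m - 1 else m) = 0
       then p
       else if p + 1 < ct.length then
         scanA ct (p + 1) (if ct.getD p "" = "(" then m + 1 else if ct.getD p "" = ")" then m - 1 else m)
       else p) := by
  rw [scanA]
  simp only [hp, dif_pos]

theorem scanCont_step (ct : List String) (p r r' : Nat) (hp : p < ct.length)
    (hr' : (r' : Int) = (r : Int) + (if ct.getD p "" = "(" then 1 else if ct.getD p "" = ")" then -1 else 0))
    (hne : r' ≠ 0) :
    scanCont ct p r = scanCont ct (p + 1) r' := by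
  have hm : (if ct.getD p "" = "(" then (r : Int) + 1 else if ct.getD p "" = ")" then (r : Int) - 1 else (r : Int)) = (r' : Int) := by
    split_ifs at hr' ⊢ <;> omega
  unfold scanCont
  rw [if_pos hp, scanA_unfold ct p r hp, hm]
  have hne' : ¬((r' : Int) = 0) := by exact_mod_cast hne
  rw [if_neg hne']
  by_cases h2 : p + 1 < ct.length
  · rw [if_pos h2, if_pos h2]
  · rw [if_neg h2, if_neg h2]
    omega

theorem scanCont_pop (ct : List String) (p : Nat) (hp : p < ct.length)
    (ht : ct.getD p "" = ")") : scanCont ct p 1 = p := by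
  unfold scanCont
  rw [if_pos hp, Nat.cast_one, scanA_unfold ct p 1 hp, ht]
  have hne : ¬((")" : String) = "(") := by decide
  simp [hne]

theorem getD_set_self {l : List Nat} {i : Nat} {v : Nat} (h : i < l.length) :
    (l.set i v).getD i 0 = v := by
  simp [List.getD_eq_getElem?_getD, h]

theorem getD_set_ne {l : List Nat} {i j : Nat} {v : Nat} (h : i ≠ j) :
    (l.set i v).getD j 0 = l.getD j 0 := by
  simp [List.getD_eq_getElem?_getD, List.getElem?_set_ne h]

theorem step_inv (ct : List String) (p : Nat) (s : List Nat × List Nat)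
    (hp : p < ct.length) (hinv : pvInv ct p s) :
    pvInv ct (p + 1) (bStep s ((p : Int), ct.getD p "")) := by
  obtain ⟨mt, stk⟩ := s
  obtain ⟨hlen, hstk, hpw, hscan, hdone, hfresh⟩ := hinv
  unfold bStep
  simp only [Int.toNat_natCast]
  by_cases ht1 : ct.getD p "" = "("
  · rw [if_pos ht1]
    refine ⟨hlen, ?_, ?_, ?_, ?_, ?_⟩
    · intro a ha
      rcases List.mem_cons.mp ha with rfl | ha'
      · exact ⟨by omega, ht1, hfresh a le_rfl hp⟩
      · obtain ⟨g1, g2, g3⟩ := hstk a ha'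
        exact ⟨by omega, g2, g3⟩
    · exact List.pairwise_cons.mpr ⟨fun a ha => (hstk a ha).1, hpw⟩
    · intro r hr
      match r with
      | 0 =>
        by_cases hlast : p + 1 < ct.length
        · right
          simp only [List.getElem_cons_zero]
          unfold scanCont
          rw [if_pos hlast]
          norm_num
        · left
          simp only [List.getElem_cons_zero]
          omega
      | r' + 1 =>
        have hr' : r' < stk.length := by simpa using hr
        rcases hscan r' hr' with hL | hR
        · left; simpa using hL
        · right
          simp only [List.getElem_cons_succ]
          rw [hR]
          exact scanCont_step ct p (r' + 1) (r' + 2) hp (by rw [if_pos ht1]; push_cast; ring) (by omega)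
    · intro i hi hpar hni
      have hi' : i < p := by
        rcases Nat.lt_succ_iff_lt_or_eq.mp hi with h | rfl
        · exact h
        · exact absurd (List.mem_cons_self) hni
      exact hdone i hi' hpar (fun hmem => hni (List.mem_cons_of_mem _ hmem))
    · intro i hi hilen
      exact hfresh i (by omega) hilen
  · rw [if_neg ht1]
    by_cases ht2 : ct.getD p "" = ")"
    · rw [if_pos ht2]
      cases stk with
      | nil =>
        refine ⟨hlen, ?_, ?_, ?_, ?_, ?_⟩
        · intro a ha; simp at ha
        · simp
        · intro r hr; simp at hr
        · intro i hi hpar hni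
          have hi' : i < p := by
            rcases Nat.lt_succ_iff_lt_or_eq.mp hi with h | rfl
            · exact h
            · exact absurd hpar ht1
          exact hdone i hi' hpar hni
        · intro i hi hilen; exact hfresh i (by omega) hilen
      | cons top rest =>
        have htop := hstk top List.mem_cons_self
        have htoplt : top < mt.length := by
          have hlen' : mt.length = ct.length := hlen
          omega
        have htopscan : scanA ct (top + 1) 1 = p := by
          have h0 := hscan 0 (by simp)
          simp only [List.getElem_cons_zero] at h0
          rcases h0 with hL | hR
          · omega
          · rw [hR]
            exact scanCont_pop ct p hp ht2
        have hpwrest : ∀ a ∈ rest, top > a := (List.pairwise_cons.mp hpw).1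
        refine ⟨by simpa using hlen, ?_, ?_, ?_, ?_, ?_⟩
        · intro a ha
          obtain ⟨g1, g2, g3⟩ := hstk a (List.mem_cons_of_mem _ ha)
          refine ⟨by omega, g2, ?_⟩
          rw [getD_set_ne (by have := hpwrest a ha; omega)]
          exact g3
        · exact (List.pairwise_cons.mp hpw).2
        · intro r hr
          have hr1 : r + 1 < (top :: rest).length := by simpa using hr
          rcases hscan (r + 1) hr1 with hL | hR
          · left
            simpa using hL
          · right
            simp only [List.getElem_cons_succ] at hR
            rw [hR]
            exact scanCont_step ct p (r + 2) (r + 1) hp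
              (by rw [if_neg ht1, if_pos ht2]; push_cast; ring) (by omega)
        · intro i hi hpar hni
          rcases Nat.lt_succ_iff_lt_or_eq.mp hi with hi' | rfl
          · by_cases hit : i = top
            · subst hit
              rw [getD_set_self htoplt, htopscan]
            · rw [getD_set_ne (fun h => hit h.symm)]
              exact hdone i hi' hpar (by simp [hit, hni])
          · exact absurd hpar ht1
        · intro i hi hilen
          rw [getD_set_ne (by omega)]
          exact hfresh i (by omega) hilen
    · rw [if_neg ht2]
      refine ⟨hlen, ?_, hpw, ?_, ?_, ?_⟩
      · intro a ha
        obtain ⟨g1, g2, g3⟩ := hstk a ha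
        exact ⟨by omega, g2, g3⟩
      · intro r hr
        rcases hscan r hr with hL | hR
        · left; exact hL
        · right
          rw [hR]
          exact scanCont_step ct p (r + 1) (r + 1) hp
            (by rw [if_neg ht1, if_neg ht2]; push_cast; ring) (by omega)
      · intro i hi hpar hni
        rcases Nat.lt_succ_iff_lt_or_eq.mp hi with hi' | rfl
        · exact hdone i hi' hpar hni
        · exact absurd hpar ht1
      · intro i hi hilen
        exact hfresh i (by omega) hilen

theorem fold_inv (ct : List String) (suf : List String) :
    ∀ (p : Nat) (s : List Nat × List Nat), ct.drop p = suf → pvInv ct p s →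
      pvInv ct (p + suf.length) ((PySem.List.enumerate suf (p : Int)).foldl bStep s) := by
  induction suf with
  | nil =>
    intro p s _ hinv
    simpa [PySem.List.enumerate_nil] using hinv
  | cons tok suf ih =>
    intro p s hdrop hinv
    have hp : p < ct.length := by
      by_contra h
      rw [List.drop_eq_nil_of_le (by omega)] at hdrop
      simp at hdrop
    have htok : ct.getD p "" = tok := by
      have h0 : (ct.drop p)[0]? = ct[p + 0]? := List.getElem?_drop
      rw [hdrop] at h0
      simp only [List.getElem?_cons_zero, Nat.add_zero] at h0
      simp [List.getD_eq_getElem?_getD, ← h0]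
    have hdrop' : ct.drop (p + 1) = suf := by
      have : ct.drop (p + 1) = (ct.drop p).drop 1 := by
        rw [List.drop_drop]
      rw [this, hdrop]
      rfl
    rw [PySem.List.enumerate_cons]
    simp only [List.foldl_cons]
    have h2 := step_inv ct p s hp hinv
    rw [htok] at h2
    have h3 := ih (p + 1) (bStep s ((p : Int), tok)) hdrop' h2
    have hcast : ((p : Int) + 1) = (((p + 1 : Nat)) : Int) := by push_cast; ring
    rw [hcast]
    have harith : p + (tok :: suf).length = (p + 1) + suf.length := by
      simp [List.length_cons]; omega
    rw [harith]
    exact h3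

theorem buildMatch_spec (ct : List String) (i : Nat) (h1 : i + 1 < ct.length)
    (h2 : ct.getD i "" = "(") :
    (buildMatch ct).getD i 0 = scanA ct (i + 1) 1 := by
  have h0 : pvInv ct 0 (List.replicate ct.length (ct.length - 1), ([] : List Nat)) := by
    refine ⟨by simp, by simp, by simp, by simp, ?_, ?_⟩
    · intro i hi; omega
    · intro j _ hjlen
      simp [List.getD_eq_getElem?_getD, hjlen]
  have hfin := fold_inv ct ct 0 (List.replicate ct.length (ct.length - 1), []) (by simp) h0
  rw [Nat.cast_zero, Nat.zero_add] at hfin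
  obtain ⟨hlen, hstk, hpw, hscan, hdone, hfresh⟩ := hfin
  unfold buildMatch
  by_cases hmem : i ∈ ((PySem.List.enumerate ct 0).foldl bStep (List.replicate ct.length (ct.length - 1), [])).2
  · obtain ⟨r, hr, hgr⟩ := List.mem_iff_getElem.mp hmem
    rcases hscan r hr with hL | hR
    · rw [hgr] at hL
      omega
    · rw [hgr] at hR
      have hcont : scanCont ct ct.length (r + 1) = ct.length - 1 := by
        unfold scanCont
        rw [if_neg (by omega)]
      rw [hR, hcont]
      exact (hstk i hmem).2.2
  · exact hdone i (by omega) h2 hmem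

-- ===== VERDICT (by name: the statement is the Claim_ definition above) =====
theorem gen_unrooted_trees_spec : Claim_equal_gen_unrooted_trees := by
  intro ct nt _
  unfold Spec_gen_unrooted_trees
  unfold gen_unrooted_trees gen_unrooted_trees_alt
  apply PySem.List.foldl_congr_mem
  intro acc i hi
  obtain ⟨h1, h2⟩ := (PySem.List.mem_pyRange_one).mp hi
  obtain ⟨k, rfl⟩ : ∃ m : ℕ, i = (m : ℤ) := ⟨i.toNat, by omega⟩
  have hlt : k + 1 < ct.length := by omega
  simp only [PySem.List.pyGetD_natCast, Int.toNat_natCast]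
  by_cases htok : ct.getD k "" = "("
  · rw [if_pos htok, if_pos htok, buildMatch_spec ct k hlt htok]
    have hne : ¬(((scanA ct (k + 1) 1 : Nat) : Int) = -1) := by omega
    simp [hne]
  · rw [if_neg htok, if_neg htok]
    by_cases hin : PySem.Str.isIn (ct.getD k "") "(),;" = true
    · rw [if_pos hin, if_pos hin]
      simp
    · rw [if_neg hin, if_neg hin]
      have hne : ¬(((k : ℕ) : Int) = -1) := by omega
      simp [hne]
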